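-- pv_equiv track=rewrite | github.com/itsmehari/SmartRecipe | SmartRecipe_Code_Bundle/services/diet_validator.py | infer_recipe_diet
-- ===== SOURCE A (Python) =====
-- NON_VEG_INGREDIENTS = {
--     "chicken", "beef", "pork", "lamb", "mutton", "fish", "shrimp", "prawn",
--     "meat", "seafood", "crab", "lobster", "bacon", "ham", "sausage", "egg",
-- }
--
-- DAIRY_EGG_INGREDIENTS = {
--     "egg", "milk", "butter", "cheese", "cream", "yogurt", "honey",
--     "ghee", "gelatin", "whey", "casein",
-- }
--
-- JAIN_AVOID_INGREDIENTS = {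
--     "onion", "garlic", "potato", "carrot", "beetroot", "radish",
--     "ginger", "turmeric", "sweet potato", "yam", "turnip",
-- }
--
-- def infer_recipe_diet(ingredients):
--     """
--     Infer correct diet tags from recipe ingredients.
--     Overrides CSV tags — a recipe with chicken is Non-Vegetarian, never Vegetarian.
--     Returns list of valid diet strings.
--     """
--     if not ingredients:
--         return []
--     ings = {i.strip().lower() for i in ingredients if i and isinstance(i, str)}
--     # Also check substrings: "chicken breast" contains "chicken"
--     def has_any(ing_set):
--         for ing in ings:
--             for term in ing_set:
--                 if term in ing or ing in term:
--                     return True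
--         return False
--
--     diets = []
--     if has_any(NON_VEG_INGREDIENTS):
--         diets = ["Non-Vegetarian", "High Protein"]
--     else:
--         diets = ["Vegetarian", "High Protein"]
--         if not has_any(DAIRY_EGG_INGREDIENTS):
--             diets.insert(1, "Vegan")
--         if not has_any(JAIN_AVOID_INGREDIENTS):
--             diets.append("Jain")
--     return diets
-- ===== SOURCE B (Python) =====
-- NON_VEG_INGREDIENTS = {
--     "chicken", "beef", "pork", "lamb", "mutton", "fish", "shrimp", "prawn",
--     "meat", "seafood", "crab", "lobster", "bacon", "ham", "sausage", "egg",
-- }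
--
-- DAIRY_EGG_INGREDIENTS = {
--     "egg", "milk", "butter", "cheese", "cream", "yogurt", "honey",
--     "ghee", "gelatin", "whey", "casein",
-- }
--
-- JAIN_AVOID_INGREDIENTS = {
--     "onion", "garlic", "potato", "carrot", "beetroot", "radish",
--     "ginger", "turmeric", "sweet potato", "yam", "turnip",
-- }
--
-- # one merged keyword table: term -> category bitmask (1 = non-veg, 2 = dairy/egg, 4 = jain-avoid)
-- _TERM_MASKS = ([(t, 1) for t in NON_VEG_INGREDIENTS]
--                + [(t, 2) for t in DAIRY_EGG_INGREDIENTS]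
--                + [(t, 4) for t in JAIN_AVOID_INGREDIENTS])
--
-- # decode table for the vegetarian case, keyed by the dairy/jain bits of the mask
-- _VEG_TABLE = {
--     0: ["Vegetarian", "Vegan", "High Protein", "Jain"],
--     2: ["Vegetarian", "High Protein", "Jain"],
--     4: ["Vegetarian", "Vegan", "High Protein"],
--     6: ["Vegetarian", "High Protein"],
-- }
--
-- def infer_recipe_diet(ingredients):
--     if not ingredients:
--         return []
--     ings = {i.strip().lower() for i in ingredients if i and isinstance(i, str)}
--     mask = 0
--     for ing in ings:
--         for term, m in _TERM_MASKS:
--             if term in ing or ing in term: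
--                 mask |= m
--     if mask & 1:
--         return ["Non-Vegetarian", "High Protein"]
--     return list(_VEG_TABLE[mask & 6])
-- ===== Notes on version B (the rewrite author's own statement) =====
-- stated objective: alternative
-- what changed: Replaces the three separate has_any scans and insert/append list mutation by a single merged (term, category-bitmask) table folded into one integer mask per pass over the cleaned set, with the final diet list decoded from the mask via a 4-entry lookup table.
import Mathlib
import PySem

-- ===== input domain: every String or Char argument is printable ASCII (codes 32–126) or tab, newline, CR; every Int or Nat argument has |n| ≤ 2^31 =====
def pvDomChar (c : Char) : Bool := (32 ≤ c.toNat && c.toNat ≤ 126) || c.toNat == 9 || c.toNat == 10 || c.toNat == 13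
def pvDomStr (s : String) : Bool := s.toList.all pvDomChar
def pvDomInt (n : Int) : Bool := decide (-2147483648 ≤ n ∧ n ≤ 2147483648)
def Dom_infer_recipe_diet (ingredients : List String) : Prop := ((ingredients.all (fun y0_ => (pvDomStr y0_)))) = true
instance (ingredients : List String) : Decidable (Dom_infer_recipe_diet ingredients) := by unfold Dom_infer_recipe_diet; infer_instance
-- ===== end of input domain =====

-- B replaces A's three separate has_any scans and insert/append mutation by a single merged
-- (term, category-bitmask) table folded into one integer mask in one pass, decoded by a 4-entry
-- lookup table (alternative decomposition, same cost).


-- module-level keyword constants (shared by both Pythons)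
def pvNonVeg : List String :=
  ["chicken", "beef", "pork", "lamb", "mutton", "fish", "shrimp", "prawn",
   "meat", "seafood", "crab", "lobster", "bacon", "ham", "sausage", "egg"]

def pvDairyEgg : List String :=
  ["egg", "milk", "butter", "cheese", "cream", "yogurt", "honey",
   "ghee", "gelatin", "whey", "casein"]

def pvJainAvoid : List String :=
  ["onion", "garlic", "potato", "carrot", "beetroot", "radish",
   "ginger", "turmeric", "sweet potato", "yam", "turnip"]

-- the cleaned set: {i.strip().lower() for i in ingredients if i and isinstance(i, str)}
def pvClean (ingredients : List String) : PySem.Set String :=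
  PySem.Set.ofList ((ingredients.filter (fun i => i ≠ "")).map
    (fun i => PySem.Str.lower (PySem.Str.strip i)))

-- ===== PORT A =====
-- A's has_any: nested loops with early return = any-of-any
def pvHasAny (ings : List String) (ingSet : List String) : Bool :=
  ings.any (fun ing => ingSet.any (fun term => PySem.Str.isIn term ing || PySem.Str.isIn ing term))

def infer_recipe_diet (ingredients : List String) : List String :=
  if ingredients = [] then []
  else
    let ings := pvClean ingredients
    if pvHasAny ings pvNonVeg then ["Non-Vegetarian", "High Protein"]
    else
      let diets := ["Vegetarian", "High Protein"]
      let diets := if !pvHasAny ings pvDairyEgg then PySem.List.insert diets 1 "Vegan" else diets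
      let diets := if !pvHasAny ings pvJainAvoid then diets ++ ["Jain"] else diets
      diets

-- ===== PORT B =====
-- _TERM_MASKS: one merged keyword table, term -> category bitmask (1 non-veg, 2 dairy/egg, 4 jain-avoid)
def pvTermMasks : List (String × Nat) :=
  pvNonVeg.map (fun t => (t, 1)) ++ pvDairyEgg.map (fun t => (t, 2)) ++ pvJainAvoid.map (fun t => (t, 4))

-- _VEG_TABLE: decode table for the vegetarian case, keyed by the dairy/jain bits of the mask
def pvVegTable : PySem.Dict Nat (List String) :=
  PySem.Dict.ofList
    [(0, ["Vegetarian", "Vegan", "High Protein", "Jain"]),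
     (2, ["Vegetarian", "High Protein", "Jain"]),
     (4, ["Vegetarian", "Vegan", "High Protein"]),
     (6, ["Vegetarian", "High Protein"])]

def infer_recipe_diet_alt (ingredients : List String) : List String :=
  if ingredients = [] then []
  else
    let ings := pvClean ingredients
    let mask : Nat := ings.foldl
      (fun mask ing => pvTermMasks.foldl
        (fun mask tm =>
          if PySem.Str.isIn tm.1 ing || PySem.Str.isIn ing tm.1 then mask ||| tm.2 else mask)
        mask)
      0
    if mask &&& 1 ≠ 0 then ["Non-Vegetarian", "High Protein"]
    else
      -- _VEG_TABLE[mask & 6]: the key mask &&& 6 is always present, so the none branch is unreachable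
      match pvVegTable.get? (mask &&& 6) with
      | some diets => diets
      | none => []

-- ===== PRECONDITION & SPEC =====
def Spec_infer_recipe_diet (ingredients : List String) (out : List String) : Prop := out = infer_recipe_diet_alt ingredients
instance (ingredients : List String) (out : List String) : Decidable (Spec_infer_recipe_diet ingredients out) := by unfold Spec_infer_recipe_diet; infer_instance

-- ===== CLAIM (what is proved, stated in full; the proofs are below) =====
def Claim_equal_infer_recipe_diet : Prop := ∀ (ingredients : List String), Dom_infer_recipe_diet ingredients → Spec_infer_recipe_diet ingredients (infer_recipe_diet ingredients)

-- ===== LEMMAS AND PROOFS =====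

-- canonical mask of the three category flags
def pvMaskOf (a b c : Bool) : Nat :=
  (if a then 1 else 0) ||| (if b then 2 else 0) ||| (if c then 4 else 0)

-- a fold over one uniformly-tagged block ORs its tag in iff some term matches
theorem pv_fold_block (ing : String) (L : List String) (m acc : Nat) :
    (L.map (fun t => (t, m))).foldl
      (fun acc tm =>
        if PySem.Str.isIn tm.1 ing || PySem.Str.isIn ing tm.1 then acc ||| tm.2 else acc) acc
    = acc ||| (if L.any (fun t => PySem.Str.isIn t ing || PySem.Str.isIn ing t) then m else 0) := by
  induction L generalizing acc with
  | nil => simp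
  | cons x xs ih =>
    by_cases hx : (PySem.Str.isIn x ing || PySem.Str.isIn ing x) = true
    · simp only [List.map_cons, List.foldl_cons, hx, if_true, ih, List.any_cons, Bool.true_or,
        Nat.lor_assoc]
      cases xs.any (fun t => PySem.Str.isIn t ing || PySem.Str.isIn ing t) <;> simp
    · have hx' : (PySem.Str.isIn x ing || PySem.Str.isIn ing x) = false := by
        exact Bool.not_eq_true _ ▸ Bool.of_not_eq_true hx
      simp only [List.map_cons, List.foldl_cons, hx', Bool.false_eq_true, if_false, ih,
        List.any_cons, Bool.false_or]

-- masks of two flag triples OR to the mask of the disjunctions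
theorem pv_maskOf_lor (a b c a' b' c' : Bool) :
    pvMaskOf a b c ||| pvMaskOf a' b' c' = pvMaskOf (a || a') (b || b') (c || c') := by
  cases a <;> cases b <;> cases c <;> cases a' <;> cases b' <;> cases c' <;> decide

-- the inner fold over the merged table adds exactly this ingredient's category mask
theorem pv_inner (ing : String) (acc : Nat) :
    pvTermMasks.foldl
      (fun acc tm =>
        if PySem.Str.isIn tm.1 ing || PySem.Str.isIn ing tm.1 then acc ||| tm.2 else acc)
      acc
    = acc ||| pvMaskOf
        (pvNonVeg.any (fun t => PySem.Str.isIn t ing || PySem.Str.isIn ing t))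
        (pvDairyEgg.any (fun t => PySem.Str.isIn t ing || PySem.Str.isIn ing t))
        (pvJainAvoid.any (fun t => PySem.Str.isIn t ing || PySem.Str.isIn ing t)) := by
  unfold pvTermMasks pvMaskOf
  rw [List.foldl_append, List.foldl_append, pv_fold_block, pv_fold_block, pv_fold_block]
  simp only [Nat.lor_assoc]

-- the outer fold computes the canonical mask of A's three has_any booleans
theorem pv_outer (ings : List String) (acc : Nat) :
    ings.foldl
      (fun acc ing => pvTermMasks.foldl
        (fun acc tm =>
          if PySem.Str.isIn tm.1 ing || PySem.Str.isIn ing tm.1 then acc ||| tm.2 else acc)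
        acc)
      acc
    = acc ||| pvMaskOf (pvHasAny ings pvNonVeg) (pvHasAny ings pvDairyEgg)
        (pvHasAny ings pvJainAvoid) := by
  induction ings generalizing acc with
  | nil => simp [pvHasAny, pvMaskOf]
  | cons x xs ih =>
    rw [List.foldl_cons, pv_inner, ih, Nat.lor_assoc, pv_maskOf_lor]
    simp only [pvHasAny, List.any_cons]

-- ===== VERDICT (by name: the statement is the Claim_ definition above) =====
theorem infer_recipe_diet_spec : Claim_equal_infer_recipe_diet := by
  intro ingredients _
  unfold Spec_infer_recipe_diet infer_recipe_diet infer_recipe_diet_alt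
  by_cases hnil : ingredients = []
  · simp [hnil]
  · simp only [hnil, if_false]
    rw [pv_outer]
    by_cases h1 : pvHasAny (pvClean ingredients) pvNonVeg = true <;>
    by_cases h2 : pvHasAny (pvClean ingredients) pvDairyEgg = true <;>
    by_cases h3 : pvHasAny (pvClean ingredients) pvJainAvoid = true <;>
      simp [h1, h2, h3, PySem.List.insert, pvMaskOf, pvVegTable] <;> decide
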